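-- pv_equiv track=rewrite | github.com/cedced19/tp-mpsi | entrainements/1/exam1.py | valmax
-- ===== SOURCE A (Python) =====
-- def dio2 (p):
--     L=[]
--     x=0
--     z=2*p*p
--     while x*x <= z:
--         y=x
--         while x*x+y*y <= z:
--             if (x*x+y*y) == z:
--                 L.append([x,y])
--             y+=1
--         x+=1
--     return(L)
--
-- def valmax(m):
--     maxi=0
--     maxi_list=[]
--     for k in range(m+1):
--         t=len(dio2(k))
--         if maxi<t:
--             maxi=t
--             maxi_list=[]
--         if maxi==t:
--             maxi_list.append(k)
--     return maxi_list
-- ===== SOURCE B (Python) =====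
-- def valmax(m):
--     squares = {y * y for y in range(2 * m + 1)}
--     pairs = [(k, sum(1 for x in range(k + 1) if 2 * k * k - x * x in squares))
--              for k in range(m + 1)]
--     best = max((c for _, c in pairs), default=0)
--     return [k for k, c in pairs if c == best]
-- ===== Notes on version B (the rewrite author's own statement) =====
-- stated objective: faster
-- what changed: Replaces the inner y-scan (a second nested while loop per x) by a single membership test in a set of squares built once, and replaces the running-max/reset-list loop by computing all counts, taking their max, and filtering the tying k's.
import Mathlib
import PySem

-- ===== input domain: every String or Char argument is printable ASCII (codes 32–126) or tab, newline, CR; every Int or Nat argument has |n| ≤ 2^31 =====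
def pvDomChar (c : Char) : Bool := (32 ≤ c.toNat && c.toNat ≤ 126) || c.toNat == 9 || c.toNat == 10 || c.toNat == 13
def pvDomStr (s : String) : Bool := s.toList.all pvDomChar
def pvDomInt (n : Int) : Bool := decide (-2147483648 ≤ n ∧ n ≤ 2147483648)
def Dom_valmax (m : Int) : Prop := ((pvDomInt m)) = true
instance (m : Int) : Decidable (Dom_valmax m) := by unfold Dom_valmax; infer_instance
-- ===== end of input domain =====

-- B replaces A's inner y-scan by membership in a set of squares built once, and A's
-- running-max/reset loop by compute-all-counts, max, filter: O(m^2) instead of O(m^3)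
-- (measurably faster).


-- ===== PORT A =====
-- termination fact for A's while loops (y*y <= z - x*x bounds y)
theorem pvIntLeMulSelf (y : Int) : y ≤ y * y := by
  by_cases h : y ≤ 0
  · nlinarith [mul_self_nonneg y, h]
  · nlinarith

-- inner 'while x*x+y*y <= z' loop of dio2 (appends [x,y] when x*x+y*y == z)
def dio2Inner (z x y : Int) (L : List (List Int)) : List (List Int) :=
  if h : x * x + y * y ≤ z then
    dio2Inner z x (y + 1) (if x * x + y * y = z then L ++ [[x, y]] else L)
  else L
termination_by (z + 1 - y).toNat
decreasing_by
  have h1 : y ≤ y * y := pvIntLeMulSelf y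
  have h2 : 0 ≤ x * x := mul_self_nonneg x
  omega

-- outer 'while x*x <= z' loop of dio2
def dio2Outer (z x : Int) (L : List (List Int)) : List (List Int) :=
  if h : x * x ≤ z then dio2Outer z (x + 1) (dio2Inner z x x L) else L
termination_by (z + 1 - x).toNat
decreasing_by
  have h1 : x ≤ x * x := pvIntLeMulSelf x
  omega

def dio2 (p : Int) : List (List Int) := dio2Outer (2 * p * p) 0 []

def valmax (m : Int) : List Int :=
  ((PySem.List.pyRange 0 (m + 1) 1).foldl (fun st k =>
    let t : Int := ((dio2 k).length : Int)
    let st1 := if st.1 < t then (t, ([] : List Int)) else st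
    if st1.1 = t then (st1.1, st1.2 ++ [k]) else st1) ((0 : Int), ([] : List Int))).2

-- ===== PORT B =====
def valmax_alt (m : Int) : List Int :=
  let squares : PySem.Set Int :=
    PySem.Set.ofList ((PySem.List.pyRange 0 (2 * m + 1) 1).map (fun y => y * y))
  let pairs : List (Int × Int) := (PySem.List.pyRange 0 (m + 1) 1).map (fun k =>
    (k, ((PySem.List.pyRange 0 (k + 1) 1).map
          (fun x => if squares.contains (2 * k * k - x * x) then (1 : Int) else 0)).sum))
  let best : Int := PySem.List.maxD (pairs.map (·.2)) (fun c => c) 0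
  (pairs.filter (fun p => p.2 = best)).map (·.1)

-- ===== PRECONDITION & SPEC =====
def Spec_valmax (m : Int) (out : List Int) : Prop := out = valmax_alt m
instance (m : Int) (out : List Int) : Decidable (Spec_valmax m out) := by unfold Spec_valmax; infer_instance

-- ===== CLAIM (what is proved, stated in full; the proofs are below) =====
def Claim_equal_valmax : Prop := ∀ (m : Int), Dom_valmax m → Spec_valmax m (valmax m)

-- ===== LEMMAS AND PROOFS =====

-- 'z - x*x is a square of some t >= x', decided via Nat.sqrt
def hasR (z x : Int) : Bool :=
  decide (0 ≤ z - x * x) &&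
    (let t : Int := ((z - x * x).toNat.sqrt : Int); decide (t * t = z - x * x ∧ x ≤ t))

theorem hasR_iff (z x : Int) (hx : 0 ≤ x) :
    hasR z x = true ↔ ∃ t, x ≤ t ∧ x * x + t * t = z := by
  unfold hasR
  simp only [Bool.and_eq_true, decide_eq_true_eq]
  constructor
  · rintro ⟨h0, h1, h2⟩
    exact ⟨_, h2, by omega⟩
  · rintro ⟨t, hxt, ht⟩
    have ht0 : 0 ≤ t := le_trans hx hxt
    have hr : z - x * x = t * t := by omega
    have htn : ((t.toNat : Int)) = t := Int.toNat_of_nonneg ht0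
    have hrn : (z - x * x).toNat = t.toNat * t.toNat := by
      have : z - x * x = ((t.toNat * t.toNat : Nat) : Int) := by push_cast [htn]; omega
      omega
    have hs : (z - x * x).toNat.sqrt = t.toNat := by rw [hrn, Nat.sqrt_eq]
    refine ⟨by nlinarith, ?_, ?_⟩ <;> rw [hs, htn]
    · omega
    · exact hxt

-- A-side count of the outer loop, mirrored as a recursion
def cntA (z x : Int) : Int :=
  if h : x * x ≤ z then (if hasR z x then 1 else 0) + cntA z (x + 1) else 0
termination_by (z + 1 - x).toNat
decreasing_by
  have h1 : x ≤ x * x := pvIntLeMulSelf x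
  omega

theorem dio2Inner_none : ∀ (n : Nat) (z x y : Int) (L : List (List Int)),
    (z + 1 - y).toNat ≤ n → (∀ t, y ≤ t → x * x + t * t ≠ z) →
    dio2Inner z x y L = L := by
  intro n
  induction n with
  | zero =>
    intro z x y L hn hno
    have h1 : y ≤ y * y := pvIntLeMulSelf y
    have h2 : 0 ≤ x * x := mul_self_nonneg x
    rw [dio2Inner]
    have hg : ¬ (x * x + y * y ≤ z) := by omega
    rw [dif_neg hg]
  | succ n ih =>
    intro z x y L hn hno
    rw [dio2Inner]
    split_ifs with hg hgeq
    · exact absurd hgeq (hno y le_rfl)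
    · have h1 : y ≤ y * y := pvIntLeMulSelf y
      have h2 : 0 ≤ x * x := mul_self_nonneg x
      exact ih z x (y + 1) L (by omega) (fun t ht => hno t (by omega))
    · rfl

theorem dio2Inner_one : ∀ (n : Nat) (z x y : Int) (L : List (List Int)) (t0 : Int),
    (z + 1 - y).toNat ≤ n → 0 ≤ y → y ≤ t0 → x * x + t0 * t0 = z →
    (dio2Inner z x y L).length = L.length + 1 := by
  intro n
  induction n with
  | zero =>
    intro z x y L t0 hn hy hyt ht
    have h2 : 0 ≤ x * x := mul_self_nonneg x
    exfalso
    have h3 : t0 ≤ t0 * t0 := pvIntLeMulSelf t0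
    omega
  | succ n ih =>
    intro z x y L t0 hn hy hyt ht
    rw [dio2Inner]
    have h2 : 0 ≤ x * x := mul_self_nonneg x
    have ht0 : 0 ≤ t0 := le_trans hy hyt
    split_ifs with hg hgeq
    · -- found the solution at y (so t0 = y); no further solution above y
      have hty : t0 = y := by nlinarith
      have hnone : ∀ t, y + 1 ≤ t → x * x + t * t ≠ z := by
        intro t htt heq
        have : t0 * t0 = t * t := by omega
        nlinarith
      rw [dio2Inner_none ((z + 1 - (y + 1)).toNat) z x (y + 1) _ le_rfl hnone]
      simp
    · -- not a solution at y, so t0 > y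
      have hty : t0 ≠ y := by intro h; rw [h] at ht; exact hgeq ht
      have h1 : y ≤ y * y := pvIntLeMulSelf y
      exact ih z x (y + 1) _ t0 (by omega) (by omega) (by omega) ht
    · -- guard false contradicts the solution t0 ≥ y ≥ 0
      exfalso; nlinarith

theorem dio2Outer_len : ∀ (n : Nat) (z x : Int) (L : List (List Int)),
    (z + 1 - x).toNat ≤ n → 0 ≤ x →
    ((dio2Outer z x L).length : Int) = L.length + cntA z x := by
  intro n
  induction n with
  | zero =>
    intro z x L hn hx
    have h1 : x ≤ x * x := pvIntLeMulSelf x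
    have hg : ¬ (x * x ≤ z) := by omega
    rw [dio2Outer, cntA, dif_neg hg, dif_neg hg]
    simp
  | succ n ih =>
    intro z x L hn hx
    have h1 : x ≤ x * x := pvIntLeMulSelf x
    rw [dio2Outer, cntA]
    by_cases hg : x * x ≤ z
    · rw [dif_pos hg, dif_pos hg, ih z (x + 1) _ (by omega) (by omega)]
      by_cases hr : hasR z x = true
      · obtain ⟨t, hxt, ht⟩ := (hasR_iff z x hx).mp hr
        rw [dio2Inner_one ((z + 1 - x).toNat) z x x L t le_rfl hx hxt ht, if_pos hr]
        push_cast
        ring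
      · have hnone : ∀ t, x ≤ t → x * x + t * t ≠ z := by
          intro t htt heq
          exact hr ((hasR_iff z x hx).mpr ⟨t, htt, heq⟩)
        rw [dio2Inner_none ((z + 1 - x).toNat) z x x L le_rfl hnone,
          if_neg hr]
        ring
    · rw [dif_neg hg, dif_neg hg]
      simp

theorem dio2_len (p : Int) : ((dio2 p).length : Int) = cntA (2 * p * p) 0 := by
  have := dio2Outer_len ((2 * p * p + 1 - 0).toNat) (2 * p * p) 0 [] le_rfl le_rfl
  simpa using this

theorem cntA_zero_of_gt : ∀ (n : Nat) (k x : Int),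
    (2 * k * k + 1 - x).toNat ≤ n → 0 ≤ k → k < x → cntA (2 * k * k) x = 0 := by
  intro n
  induction n with
  | zero =>
    intro k x hn hk hkx
    have h1 : x ≤ x * x := pvIntLeMulSelf x
    have hg : ¬ (x * x ≤ 2 * k * k) := by omega
    rw [cntA, dif_neg hg]
  | succ n ih =>
    intro k x hn hk hkx
    rw [cntA]
    split_ifs with hg hr
    · exfalso
      have hx : (0 : Int) ≤ x := by omega
      obtain ⟨t, hxt, ht⟩ := (hasR_iff (2 * k * k) x hx).mp hr
      nlinarith
    · have h1 : x ≤ x * x := pvIntLeMulSelf x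
      simpa using ih k (x + 1) (by omega) hk (by omega)
    · rfl

theorem cntA_eq_sum : ∀ (n : Nat) (k x : Int),
    (k + 1 - x).toNat ≤ n → 0 ≤ x → x ≤ k + 1 → 0 ≤ k →
    cntA (2 * k * k) x =
      ((PySem.List.pyRange x (k + 1) 1).map
        (fun x' => if hasR (2 * k * k) x' then (1 : Int) else 0)).sum := by
  intro n
  induction n with
  | zero =>
    intro k x hn hx hxk hk
    have hx1 : x = k + 1 := by omega
    rw [hx1, PySem.List.pyRange_one_eq_nil le_rfl]
    simpa using cntA_zero_of_gt (2 * k * k + 1 - (k + 1)).toNat k (k + 1) le_rfl hk (by omega)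
  | succ n ih =>
    intro k x hn hx hxk hk
    rcases eq_or_lt_of_le hxk with hx1 | hx1
    · rw [hx1, PySem.List.pyRange_one_eq_nil le_rfl]
      simpa using cntA_zero_of_gt (2 * k * k + 1 - (k + 1)).toNat k (k + 1) le_rfl hk (by omega)
    · rw [cntA, PySem.List.pyRange_one_cons hx1]
      have hg : x * x ≤ 2 * k * k := by nlinarith
      rw [dif_pos hg]
      rw [ih k (x + 1) (by omega) (by omega) (by omega) hk]
      simp

-- B's membership test agrees with hasR for 0 ≤ x ≤ k ≤ m
theorem contains_eq_hasR (m k x : Int) (hx : 0 ≤ x) (hxk : x ≤ k) (hkm : k ≤ m) :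
    (PySem.Set.ofList ((PySem.List.pyRange 0 (2 * m + 1) 1).map (fun y => y * y))).contains
      (2 * k * k - x * x) = hasR (2 * k * k) x := by
  have hk : 0 ≤ k := le_trans hx hxk
  have hm : 0 ≤ m := le_trans hk hkm
  by_cases hr : hasR (2 * k * k) x = true
  · rw [hr, PySem.Set.contains_iff, PySem.Set.mem_ofList, List.mem_map]
    obtain ⟨t, hxt, ht⟩ := (hasR_iff _ _ hx).mp hr
    have ht0 : 0 ≤ t := le_trans hx hxt
    refine ⟨t, PySem.List.mem_pyRange_one.mpr ⟨ht0, ?_⟩, by omega⟩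
    nlinarith
  · have hrf : hasR (2 * k * k) x = false := by simpa using hr
    rw [hrf, Bool.eq_false_iff]
    intro hc
    rw [PySem.Set.contains_iff, PySem.Set.mem_ofList, List.mem_map] at hc
    obtain ⟨y, hy, hyy⟩ := hc
    rw [PySem.List.mem_pyRange_one] at hy
    have hxy : x ≤ y := by nlinarith [hy.1, hxk, hx]
    exact hr ((hasR_iff _ _ hx).mpr ⟨y, hxy, by omega⟩)

-- project-then-filter of (k, f k) pairs is filter on k
theorem filter_pairs_eq (f : Int → Int) (b : Int) : ∀ (l : List Int),
    ((l.map (fun k => (k, f k))).filter (fun p => p.2 = b)).map (·.1) =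
      l.filter (fun k => f k = b) := by
  intro l
  induction l with
  | nil => rfl
  | cons a l ih =>
    simp only [List.map_cons, List.filter_cons]
    by_cases h : f a = b
    · simp [h, ih]
    · simp [h, ih]

-- max(xs, default=0) is the running max from 0 when all elements are nonnegative
theorem maxD_eq_foldl (xs : List Int) (h : ∀ x ∈ xs, 0 ≤ x) :
    PySem.List.maxD xs (fun c => c) 0 = xs.foldl max 0 := by
  cases xs with
  | nil => rfl
  | cons a t =>
    have ha : 0 ≤ a := h a (by simp)
    have : PySem.List.maxD (a :: t) (fun c => c) 0 = t.foldl max a := by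
      simp [PySem.List.maxD, PySem.List.max?_id_cons]
    rw [this, List.foldl_cons, max_eq_right ha]

-- A's running-max/tie-list fold, characterised in closed form
theorem fold_char (f : Int → Int) : ∀ (l : List Int) (M0 : Int) (acc : List Int),
    l.foldl (fun st k =>
      let t : Int := f k
      let st1 := if st.1 < t then (t, ([] : List Int)) else st
      if st1.1 = t then (st1.1, st1.2 ++ [k]) else st1) ((M0 : Int), acc)
    = (l.foldl (fun a k => max a (f k)) M0,
       (if l.foldl (fun a k => max a (f k)) M0 = M0 then acc else []) ++
         l.filter (fun k => f k = l.foldl (fun a k => max a (f k)) M0)) := by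
  intro l
  induction l with
  | nil => simp
  | cons a l ih =>
    intro M0 acc
    have hcons : (a :: l).foldl (fun a k => max a (f k)) M0
        = l.foldl (fun a k => max a (f k)) (max M0 (f a)) := rfl
    rw [hcons, List.filter_cons]
    conv_lhs => rw [List.foldl_cons]
    have hle := (PySem.List.le_foldl_max_int l f (max M0 (f a))).1
    by_cases h1 : M0 < f a
    · have hmax : max M0 (f a) = f a := max_eq_right (le_of_lt h1)
      rw [hmax] at hle ⊢
      have hred : ((let t : Int := f a
          let st1 := if (M0, acc).1 < t then (t, ([] : List Int)) else (M0, acc)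
          if st1.1 = t then (st1.1, st1.2 ++ [a]) else st1))
          = (f a, [a]) := by simp [h1]
      rw [hred, ih (f a) [a]]
      simp only [Prod.mk.injEq]
      refine ⟨trivial, ?_⟩
      rw [if_neg (show ¬ (List.foldl (fun a k => max a (f k)) (f a) l = M0) by omega)]
      by_cases h2 : f a = List.foldl (fun a k => max a (f k)) (f a) l
      · rw [if_pos h2.symm, if_pos (decide_eq_true h2)]
        simp
      · rw [if_neg (fun h => h2 h.symm), decide_eq_false h2]
        simp
    · have hmax : max M0 (f a) = M0 := max_eq_left (by omega)
      rw [hmax] at hle ⊢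
      by_cases h2 : M0 = f a
      · have hred : ((let t : Int := f a
          let st1 := if (M0, acc).1 < t then (t, ([] : List Int)) else (M0, acc)
          if st1.1 = t then (st1.1, st1.2 ++ [a]) else st1))
          = (M0, acc ++ [a]) := by simp [← h2]
        rw [hred, ih M0 (acc ++ [a])]
        simp only [Prod.mk.injEq]
        refine ⟨trivial, ?_⟩
        by_cases h3 : List.foldl (fun a k => max a (f k)) M0 l = M0
        · rw [if_pos h3, if_pos h3]
          have h4 : f a = List.foldl (fun a k => max a (f k)) M0 l := by omega
          rw [if_pos (decide_eq_true h4)]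
          simp
        · rw [if_neg h3, if_neg h3]
          have h4 : ¬ (f a = List.foldl (fun a k => max a (f k)) M0 l) := by omega
          rw [decide_eq_false h4]
          simp
      · have hred : ((let t : Int := f a
          let st1 := if (M0, acc).1 < t then (t, ([] : List Int)) else (M0, acc)
          if st1.1 = t then (st1.1, st1.2 ++ [a]) else st1))
          = (M0, acc) := by simp [h1, h2]
        rw [hred, ih M0 acc]
        simp only [Prod.mk.injEq]
        refine ⟨trivial, ?_⟩
        have h4 : ¬ (f a = List.foldl (fun a k => max a (f k)) M0 l) := by omega
        rw [decide_eq_false h4]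
        simp

-- ===== VERDICT (by name: the statement is the Claim_ definition above) =====
theorem valmax_spec : Claim_equal_valmax := by
  intro m _
  unfold Spec_valmax valmax valmax_alt
  simp only []
  rw [fold_char (fun k => ((dio2 k).length : Int))]
  simp only [ite_self, List.nil_append]
  -- identify both counting functions on the members of the range
  have hcnt : ∀ k ∈ PySem.List.pyRange 0 (m + 1) 1,
      ((dio2 k).length : Int) =
        ((PySem.List.pyRange 0 (k + 1) 1).map
          (fun x => if (PySem.Set.ofList ((PySem.List.pyRange 0 (2 * m + 1) 1).map
              (fun y => y * y))).contains (2 * k * k - x * x) then (1 : Int) else 0)).sum := by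
    intro k hk
    rw [PySem.List.mem_pyRange_one] at hk
    rw [dio2_len, cntA_eq_sum (k + 1 - 0).toNat k 0 le_rfl le_rfl (by omega) hk.1]
    apply congrArg
    apply List.map_congr_left
    intro x hx
    rw [PySem.List.mem_pyRange_one] at hx
    rw [contains_eq_hasR m k x hx.1 (by omega) (by omega)]
  rw [List.map_map]
  have hsnd : ((PySem.List.pyRange 0 (m + 1) 1).map
      ((fun p => p.2) ∘ (fun k => (k, ((PySem.List.pyRange 0 (k + 1) 1).map
        (fun x => if (PySem.Set.ofList ((PySem.List.pyRange 0 (2 * m + 1) 1).map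
          (fun y => y * y))).contains (2 * k * k - x * x) then (1 : Int) else 0)).sum))))
      = (PySem.List.pyRange 0 (m + 1) 1).map (fun k => ((PySem.List.pyRange 0 (k + 1) 1).map
        (fun x => if (PySem.Set.ofList ((PySem.List.pyRange 0 (2 * m + 1) 1).map
          (fun y => y * y))).contains (2 * k * k - x * x) then (1 : Int) else 0)).sum) := rfl
  rw [hsnd, filter_pairs_eq]
  rw [maxD_eq_foldl _ ?hnn]
  case hnn =>
    intro c hc
    rw [List.mem_map] at hc
    obtain ⟨k, _, rfl⟩ := hc
    apply List.sum_nonneg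
    intro x hx
    rw [List.mem_map] at hx
    obtain ⟨x', _, rfl⟩ := hx
    split_ifs <;> norm_num
  rw [List.foldl_map]
  have hF := PySem.List.foldl_congr_mem
    (l := PySem.List.pyRange 0 (m + 1) 1) (init := (0 : Int))
    (f := fun a k => max a ((dio2 k).length : Int))
    (g := fun a k => max a ((fun k => ((PySem.List.pyRange 0 (k + 1) 1).map
        (fun x => if (PySem.Set.ofList ((PySem.List.pyRange 0 (2 * m + 1) 1).map
          (fun y => y * y))).contains (2 * k * k - x * x) then (1 : Int) else 0)).sum) k))
    (fun acc k hk => by simp only [hcnt k hk])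
  rw [← hF]
  exact List.filter_congr (fun k hk => by simp only [hcnt k hk])
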